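-- pv_equiv track=rewrite | github.com/ydb-platform/ydb | ydb/tests/functional/suite_tests/test_base.py | split_by_statement
-- ===== SOURCE A (Python) =====
-- def split_by_statement(lines):
--     statement_lines = []
--     statement_start_line_idx = 0
--     for line_idx, line in lines:
--         if line:
--             if line.startswith("statement "):
--                 statement_start_line_idx = line_idx
--                 statement_lines = [line]
--             elif statement_lines:
--                 statement_lines.append(line)
--         else:
--             if statement_lines:
--                 yield (statement_start_line_idx, statement_lines)
--                 statement_lines = []
--     if statement_lines:
--         yield (statement_start_line_idx + 1, statement_lines)
-- ===== SOURCE B (Python) =====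
-- def _emit(run, bump=0):
--     # the block of a run is its last "statement " line plus everything after it;
--     # bump is added to the reported start index
--     for j in range(len(run) - 1, -1, -1):
--         if run[j][1].startswith("statement "):
--             yield (run[j][0] + bump, [line for _, line in run[j:]])
--             return
--
--
-- def split_by_statement(lines):
--     """Yield (start_idx, block) for each blank-line-separated run that contains a
--     'statement ' marker: the block is the run's last marker line together with the
--     lines after it.  A block terminated by end-of-input reports its start index
--     one past the marker line's."""
--     run = []
--     for pair in lines:
--         if pair[1]:
--             run.append(pair)
--         else:
--             yield from _emit(run)
--             run = []
--     yield from _emit(run, 1)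
-- ===== Notes on version B (the rewrite author's own statement) =====
-- stated objective: alternative
-- what changed: B collects each maximal run of non-empty lines as raw pairs and searches it backward for the last 'statement ' marker when the run closes (at a blank line, or at end-of-input where the reported index is one past the marker's), instead of A's single pass threading mutable statement_lines/start-index state through every line.
import Mathlib
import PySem

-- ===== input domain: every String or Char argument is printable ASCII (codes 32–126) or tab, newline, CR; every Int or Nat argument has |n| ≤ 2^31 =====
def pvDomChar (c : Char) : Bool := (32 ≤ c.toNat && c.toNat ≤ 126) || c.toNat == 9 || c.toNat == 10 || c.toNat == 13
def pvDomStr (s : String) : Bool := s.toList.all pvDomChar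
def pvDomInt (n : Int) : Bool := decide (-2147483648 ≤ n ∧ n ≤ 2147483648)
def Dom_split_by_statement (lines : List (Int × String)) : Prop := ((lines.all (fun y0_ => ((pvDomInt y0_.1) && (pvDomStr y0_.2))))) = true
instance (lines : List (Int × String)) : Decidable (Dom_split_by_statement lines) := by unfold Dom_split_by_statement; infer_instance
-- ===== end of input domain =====

-- B collects each maximal run of non-empty lines as raw pairs and searches it backward for
-- the last 'statement ' marker when the run closes (blank line, or end-of-input with the
-- +1 start index), instead of A's single pass with mutable block state; objective:
-- alternative decomposition, same cost. (A is a generator; return value compared as a list.)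


-- ===== PORT A =====
-- one step of A's for-loop over the state (statement_lines, statement_start_line_idx, yielded)
def pvStepA (s : List String × Int × List (Int × List String)) (p : Int × String) :
    List String × Int × List (Int × List String) :=
  if p.2 ≠ "" then
    if PySem.Str.startswith p.2 "statement " then ([p.2], p.1, s.2.2)
    else if s.1 ≠ [] then (s.1 ++ [p.2], s.2.1, s.2.2)
    else s
  else
    if s.1 ≠ [] then ([], s.2.1, s.2.2 ++ [(s.2.1, s.1)])
    else s

-- A's final flush after the loop (the EOF yield uses idx + 1)
def pvFinishA (s : List String × Int × List (Int × List String)) : List (Int × List String) :=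
  if s.1 ≠ [] then s.2.2 ++ [(s.2.1 + 1, s.1)] else s.2.2

def split_by_statement (lines : List (Int × String)) : List (Int × List String) :=
  pvFinishA (lines.foldl pvStepA ([], 0, []))

-- ===== PORT B =====
-- Source B's _emit backward search: the run's last 'statement ' marker and the suffix from there
def pvBlock : List (Int × String) → Option (Int × List String)
  | [] => none
  | (i, l) :: rest =>
    match pvBlock rest with
    | some b => some b
    | none => if PySem.Str.startswith l "statement " then some (i, l :: rest.map Prod.snd) else none

-- Source B's _emit(run, bump): the block, with bump added to the reported start index
def pvEmit (run : List (Int × String)) (bump : Int) : List (Int × List String) :=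
  match pvBlock run with
  | some b => [(b.1 + bump, b.2)]
  | none => []

-- Source B's generator loop: collect the current run; emit it at each blank line (bump 0)
-- and at end-of-input (bump 1)
def pvLoopB (run : List (Int × String)) : List (Int × String) → List (Int × List String)
  | [] => pvEmit run 1
  | p :: rest =>
    if p.2 ≠ "" then pvLoopB (run ++ [p]) rest
    else pvEmit run 0 ++ pvLoopB [] rest

def split_by_statement_alt (lines : List (Int × String)) : List (Int × List String) :=
  pvLoopB [] lines

-- ===== PRECONDITION & SPEC =====
def Spec_split_by_statement (lines : List (Int × String)) (out : List (Int × List String)) : Prop := out = split_by_statement_alt lines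
instance (lines : List (Int × String)) (out : List (Int × List String)) : Decidable (Spec_split_by_statement lines out) := by unfold Spec_split_by_statement; infer_instance

-- ===== CLAIM (what is proved, stated in full; the proofs are below) =====
def Claim_equal_split_by_statement : Prop := ∀ (lines : List (Int × String)), Dom_split_by_statement lines → Spec_split_by_statement lines (split_by_statement lines)

-- ===== LEMMAS AND PROOFS =====

lemma pvBlock_append (cur : List (Int × String)) (i : Int) (l : String) :
    pvBlock (cur ++ [(i, l)]) =
      if PySem.Str.startswith l "statement " = true then some (i, [l])
      else (pvBlock cur).map (fun b => (b.1, b.2 ++ [l])) := by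
  induction cur with
  | nil => simp [pvBlock]
  | cons q cs ih =>
    obtain ⟨j, m⟩ := q
    simp only [List.cons_append, pvBlock, ih]
    cases h : pvBlock cs <;>
      simp only [Option.map_none, Option.map_some] <;>
      split_ifs <;> simp

-- invariant: A's current block (sl, idx) is exactly what pvBlock returns on the run B collects
lemma pvMain (rest : List (Int × String)) :
    ∀ (run : List (Int × String)) (sl : List String) (idx : Int)
      (out : List (Int × List String)),
      pvBlock run = (if sl = [] then none else some (idx, sl)) →
      pvFinishA (rest.foldl pvStepA (sl, idx, out)) = out ++ pvLoopB run rest := by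
  induction rest with
  | nil =>
    intro run sl idx out hinv
    by_cases hsl : sl = []
    · subst hsl
      rw [if_pos rfl] at hinv
      simp [pvFinishA, pvLoopB, pvEmit, hinv]
    · rw [if_neg hsl] at hinv
      simp [pvFinishA, pvLoopB, pvEmit, hinv, hsl]
  | cons p rs ih =>
    intro run sl idx out hinv
    by_cases hp : p.2 = ""
    · simp only [List.foldl_cons, pvStepA,
        pvLoopB, if_neg (show ¬ p.2 ≠ "" by simp [hp])]
      by_cases hsl : sl = []
      · subst hsl
        rw [if_neg (show ¬ ([] : List String) ≠ [] by simp)]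
        rw [if_pos rfl] at hinv
        rw [ih [] [] idx out (by simp [pvBlock])]
        simp [pvEmit, hinv]
      · rw [if_pos hsl]
        rw [if_neg hsl] at hinv
        rw [ih [] [] idx (out ++ [(idx, sl)]) (by simp [pvBlock])]
        simp [pvEmit, hinv]
    · simp only [List.foldl_cons, pvStepA,
        pvLoopB, if_pos (show p.2 ≠ "" from hp)]
      by_cases hst : PySem.Str.startswith p.2 "statement " = true
      · rw [if_pos hst]
        refine ih (run ++ [p]) [p.2] p.1 out ?_
        rw [show (p : Int × String) = (p.1, p.2) from rfl, pvBlock_append, if_pos hst]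
        simp
      · rw [if_neg hst]
        have happ : pvBlock (run ++ [p]) =
            (pvBlock run).map (fun b => (b.1, b.2 ++ [p.2])) := by
          rw [show (p : Int × String) = (p.1, p.2) from rfl, pvBlock_append, if_neg hst]
        by_cases hsl : sl = []
        · rw [if_neg (show ¬ sl ≠ [] by simp [hsl])]
          refine ih (run ++ [p]) sl idx out ?_
          rw [happ, hinv]; simp [hsl]
        · rw [if_pos hsl]
          refine ih (run ++ [p]) (sl ++ [p.2]) idx out ?_
          rw [happ, hinv]; simp [hsl]

-- ===== VERDICT (by name: the statement is the Claim_ definition above) =====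
theorem split_by_statement_spec : Claim_equal_split_by_statement := by
  intro lines _
  unfold Spec_split_by_statement split_by_statement split_by_statement_alt
  have h := pvMain lines [] [] 0 [] (by simp [pvBlock])
  simpa using h
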